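-- pv_equiv track=rewrite | github.com/Mic-Toc/Ex6 | moogle.py | find_query_pages
-- ===== SOURCE A (Python) =====
-- from typing import Dict
--
-- def find_query_pages(words_query,
--                      find_words_dict: Dict[str, Dict[str, int]],
--                      total_pages):
--
--     pages_with_query = []
--     # for dictionary in find_words_dict.values():
--     #     for page in dictionary.keys():
--     #
--     #         for word in words_query:
--     #             if word not in find_words_dict.keys():
--     #                 return None
--     #
--     #             elif page not in find_words_dict[word].keys():
--     #                 is_append = False
--     #                 break
--     #
--     #         if is_append:
--     #             pages_with_query.append(page)
--     for page in total_pages: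
--         is_append = True
--
--         for word in words_query:
--             if word not in find_words_dict.keys():
--                 return None
--
--             elif page not in find_words_dict[word].keys():
--
--                 is_append = False
--                 break
--
--         if is_append:
--             pages_with_query.append(page)
--
--     return pages_with_query
-- ===== SOURCE B (Python) =====
-- def find_query_pages(words_query, find_words_dict, total_pages):
--     matches = list(total_pages)
--     for word in words_query:
--         if not matches:
--             return []
--         if word not in find_words_dict:
--             return None
--         pages = find_words_dict[word]
--         matches = [p for p in matches if p in pages]
--     return matches
-- ===== Notes on version B (the rewrite author's own statement) =====
-- stated objective: alternative
-- what changed: B traverses word-major instead of A's page-major nested scan: it keeps one shrinking candidate-page list, filters it once per query word, and exits early when no candidate remains or a word is unknown.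
import Mathlib
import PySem

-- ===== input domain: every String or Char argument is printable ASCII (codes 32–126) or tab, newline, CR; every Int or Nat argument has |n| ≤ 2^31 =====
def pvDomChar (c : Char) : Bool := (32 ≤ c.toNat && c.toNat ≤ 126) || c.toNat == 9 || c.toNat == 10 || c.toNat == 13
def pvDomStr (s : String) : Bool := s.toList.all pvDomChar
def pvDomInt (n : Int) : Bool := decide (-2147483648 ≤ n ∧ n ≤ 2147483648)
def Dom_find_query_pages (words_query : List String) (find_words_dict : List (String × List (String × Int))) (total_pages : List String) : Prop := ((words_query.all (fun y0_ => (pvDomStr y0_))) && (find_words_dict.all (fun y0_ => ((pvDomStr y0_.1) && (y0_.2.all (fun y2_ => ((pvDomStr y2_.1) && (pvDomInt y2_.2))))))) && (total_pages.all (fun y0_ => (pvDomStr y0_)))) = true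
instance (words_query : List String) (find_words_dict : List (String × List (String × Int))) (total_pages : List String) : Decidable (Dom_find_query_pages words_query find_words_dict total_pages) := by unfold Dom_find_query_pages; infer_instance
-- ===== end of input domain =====

-- B traverses word-major with one shrinking candidate-page list and early exits,
-- instead of A's page-major nested re-scan of the whole query for every page.

-- ===== PORT A =====
-- inner 'for word in words_query' loop for one page:
-- none = 'return None', some false = break (page dropped), some true = append
def pvInnerA (find_words_dict : List (String × List (String × Int))) (page : String) :
    List String → Option Bool
  | [] => some true
  | w :: ws =>
    if !(PySem.Dict.mk find_words_dict).contains w then none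
    else if !(PySem.Dict.mk ((PySem.Dict.mk find_words_dict).getD w [])).contains page then
      some false
    else pvInnerA find_words_dict page ws

-- outer 'for page in total_pages' loop, acc = pages_with_query
def pvOuterA (words_query : List String) (find_words_dict : List (String × List (String × Int))) :
    List String → List String → Option (List String)
  | [], acc => some acc
  | page :: ps, acc =>
    match pvInnerA find_words_dict page words_query with
    | none => none
    | some true => pvOuterA words_query find_words_dict ps (acc ++ [page])
    | some false => pvOuterA words_query find_words_dict ps acc

def find_query_pages (words_query : List String) (find_words_dict : List (String × List (String × Int))) (total_pages : List String) : Option (List String) :=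
  pvOuterA words_query find_words_dict total_pages []

-- ===== PORT B =====
-- 'for word in words_query' loop carrying the candidate list `cand`
def pvLoopB (find_words_dict : List (String × List (String × Int))) :
    List String → List String → Option (List String)
  | [], cand => some cand
  | w :: ws, cand =>
    if cand = [] then some []
    else if !(PySem.Dict.mk find_words_dict).contains w then none
    else pvLoopB find_words_dict ws
      (cand.filter fun p =>
        (PySem.Dict.mk ((PySem.Dict.mk find_words_dict).getD w [])).contains p)

def find_query_pages_alt (words_query : List String) (find_words_dict : List (String × List (String × Int))) (total_pages : List String) : Option (List String) :=
  pvLoopB find_words_dict words_query total_pages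

-- ===== PRECONDITION & SPEC =====
def Spec_find_query_pages (words_query : List String) (find_words_dict : List (String × List (String × Int))) (total_pages : List String) (out : Option (List String)) : Prop := out = find_query_pages_alt words_query find_words_dict total_pages
instance (words_query : List String) (find_words_dict : List (String × List (String × Int))) (total_pages : List String) (out : Option (List String)) : Decidable (Spec_find_query_pages words_query find_words_dict total_pages out) := by unfold Spec_find_query_pages; infer_instance

-- ===== CLAIM (what is proved, stated in full; the proofs are below) =====
def Claim_equal_find_query_pages : Prop := ∀ (words_query : List String) (find_words_dict : List (String × List (String × Int))) (total_pages : List String), Dom_find_query_pages words_query find_words_dict total_pages → Spec_find_query_pages words_query find_words_dict total_pages (find_query_pages words_query find_words_dict total_pages)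

-- ===== LEMMAS AND PROOFS =====

-- 'some query word is absent from the dictionary (up to here)'
def pvMiss (d : List (String × List (String × Int))) : List String → Bool
  | [] => false
  | w :: ws => if (PySem.Dict.mk d).contains w then pvMiss d ws else true

-- 'page p is indexed under every query word that precedes the first absent one'
def pvKeep (d : List (String × List (String × Int))) (p : String) : List String → Bool
  | [] => true
  | w :: ws =>
    if (PySem.Dict.mk d).contains w then
      (PySem.Dict.mk ((PySem.Dict.mk d).getD w [])).contains p && pvKeep d p ws
    else true

lemma pvMiss_cons_pos (d : List (String × List (String × Int))) (w : String) (ws : List String)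
    (hw : (PySem.Dict.mk d).contains w = true) : pvMiss d (w :: ws) = pvMiss d ws := by
  simp [pvMiss, hw]

lemma pvMiss_cons_neg (d : List (String × List (String × Int))) (w : String) (ws : List String)
    (hw : (PySem.Dict.mk d).contains w = false) : pvMiss d (w :: ws) = true := by
  simp [pvMiss, hw]

lemma pvKeep_cons_pos (d : List (String × List (String × Int))) (p w : String) (ws : List String)
    (hw : (PySem.Dict.mk d).contains w = true) :
    pvKeep d p (w :: ws)
      = ((PySem.Dict.mk ((PySem.Dict.mk d).getD w [])).contains p && pvKeep d p ws) := by
  simp [pvKeep, hw]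

lemma pvKeep_cons_neg (d : List (String × List (String × Int))) (p w : String) (ws : List String)
    (hw : (PySem.Dict.mk d).contains w = false) : pvKeep d p (w :: ws) = true := by
  simp [pvKeep, hw]

-- A's inner loop in terms of pvMiss / pvKeep
lemma pvInnerA_char (d : List (String × List (String × Int))) (p : String) (ws : List String) :
    pvInnerA d p ws =
      if pvMiss d ws && pvKeep d p ws then none
      else some (!pvMiss d ws && pvKeep d p ws) := by
  induction ws with
  | nil => simp [pvInnerA, pvMiss, pvKeep]
  | cons w ws ih =>
    by_cases hw : (PySem.Dict.mk d).contains w = true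
    · rw [pvMiss_cons_pos d w ws hw, pvKeep_cons_pos d p w ws hw]
      by_cases hp : (PySem.Dict.mk ((PySem.Dict.mk d).getD w [])).contains p = true
      · simp [pvInnerA, hw, hp, ih]
      · simp only [Bool.not_eq_true] at hp
        simp [pvInnerA, hw, hp]
    · simp only [Bool.not_eq_true] at hw
      rw [pvMiss_cons_neg d w ws hw, pvKeep_cons_neg d p w ws hw]
      simp [pvInnerA, hw]

-- A's outer loop
lemma pvOuterA_char (wq : List String) (d : List (String × List (String × Int)))
    (ps acc : List String) :
    pvOuterA wq d ps acc =
      if ps.any (fun p => (pvInnerA d p wq).isNone) then none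
      else some (acc ++ ps.filter (fun p => pvInnerA d p wq == some true)) := by
  induction ps generalizing acc with
  | nil => simp [pvOuterA]
  | cons page ps ih =>
    rcases h : pvInnerA d page wq with _ | b
    · simp [pvOuterA, h]
    · cases b
      · simp [pvOuterA, h, ih]
      · simp [pvOuterA, h, ih (acc ++ [page])]

-- B's word-major loop in terms of the same pvMiss / pvKeep
lemma pvLoopB_char (d : List (String × List (String × Int))) (ws cand : List String) :
    pvLoopB d ws cand =
      if pvMiss d ws && cand.any (fun p => pvKeep d p ws) then none
      else some (cand.filter (fun p => !pvMiss d ws && pvKeep d p ws)) := by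
  induction ws generalizing cand with
  | nil =>
    simp only [pvLoopB, pvMiss, Bool.false_and, Bool.false_eq_true, if_false, Bool.not_false,
      pvKeep, Bool.true_and, List.filter_true]
  | cons w ws ih =>
    by_cases hmm : cand = []
    · subst hmm
      simp [pvLoopB]
    · by_cases hw : (PySem.Dict.mk d).contains w = true
      · rw [show pvLoopB d (w :: ws) cand
            = pvLoopB d ws (cand.filter fun p =>
                (PySem.Dict.mk ((PySem.Dict.mk d).getD w [])).contains p) by
          simp [pvLoopB, hmm, hw]]
        rw [ih, pvMiss_cons_pos d w ws hw, List.any_filter, List.filter_filter]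
        have hfun : ∀ p, pvKeep d p (w :: ws)
            = ((PySem.Dict.mk ((PySem.Dict.mk d).getD w [])).contains p && pvKeep d p ws) :=
          fun p => pvKeep_cons_pos d p w ws hw
        have h1 : (fun p => (PySem.Dict.mk ((PySem.Dict.mk d).getD w [])).contains p
              && pvKeep d p ws) = (fun p => pvKeep d p (w :: ws)) :=
          funext fun p => (hfun p).symm
        have h2 : (fun p => (!pvMiss d ws && pvKeep d p ws)
              && (PySem.Dict.mk ((PySem.Dict.mk d).getD w [])).contains p)
            = (fun p => !pvMiss d ws && pvKeep d p (w :: ws)) :=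
          funext fun p => by
            rw [hfun p, Bool.and_assoc,
              Bool.and_comm (pvKeep d p ws) ((PySem.Dict.mk ((PySem.Dict.mk d).getD w [])).contains p)]
        rw [h1, h2]
      · simp only [Bool.not_eq_true] at hw
        have hany : cand.any (fun p => pvKeep d p (w :: ws)) = true := by
          rcases cand with _ | ⟨m, ms⟩
          · exact absurd rfl hmm
          · exact List.any_eq_true.2 ⟨m, List.mem_cons_self, pvKeep_cons_neg d m w ws hw⟩
        rw [pvMiss_cons_neg d w ws hw]
        simp [pvLoopB, hmm, hw, hany]

-- ===== VERDICT (by name: the statement is the Claim_ definition above) =====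
theorem find_query_pages_spec : Claim_equal_find_query_pages := by
  intro wq d tp _
  unfold Spec_find_query_pages find_query_pages find_query_pages_alt
  rw [pvOuterA_char, pvLoopB_char, List.nil_append]
  have e1 : (fun p => (pvInnerA d p wq).isNone)
      = (fun p => pvMiss d wq && pvKeep d p wq) := by
    funext p
    rw [pvInnerA_char]
    cases hm : pvMiss d wq <;> cases hk : pvKeep d p wq <;> simp
  have e2 : (fun p => pvInnerA d p wq == some true)
      = (fun p => !pvMiss d wq && pvKeep d p wq) := by
    funext p
    rw [pvInnerA_char]
    cases hm : pvMiss d wq <;> cases hk : pvKeep d p wq <;> simp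
  rw [e1, e2]
  have e3 : (tp.any fun p => pvMiss d wq && pvKeep d p wq)
      = (pvMiss d wq && tp.any fun p => pvKeep d p wq) := by
    cases hm : pvMiss d wq <;> simp
  rw [e3]
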